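-- pv_equiv track=rewrite | github.com/RohitPoduval1/UMN-Classes | CSCI_1133H/homeworks/hw2/loop_while.py | loop_while
-- ===== SOURCE A (Python) =====
-- def loop_while(total, sub, times):
--     total_sum = 0
--     i = 0
--     while i < times:
--         total -= sub
--         total_sum += total
--         i += 1
--     return total_sum
-- ===== SOURCE B (Python) =====
-- def loop_while(total, sub, times):
--     # closed-form arithmetic series instead of the loop
--     if times <= 0:
--         return 0
--     return times * total - sub * times * (times + 1) // 2
-- ===== Notes on version B (the rewrite author's own statement) =====
-- stated objective: faster
-- what changed: Replaced the O(times) while-loop accumulation with the closed-form arithmetic-series formula times*total - sub*times*(times+1)//2.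
import Mathlib
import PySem

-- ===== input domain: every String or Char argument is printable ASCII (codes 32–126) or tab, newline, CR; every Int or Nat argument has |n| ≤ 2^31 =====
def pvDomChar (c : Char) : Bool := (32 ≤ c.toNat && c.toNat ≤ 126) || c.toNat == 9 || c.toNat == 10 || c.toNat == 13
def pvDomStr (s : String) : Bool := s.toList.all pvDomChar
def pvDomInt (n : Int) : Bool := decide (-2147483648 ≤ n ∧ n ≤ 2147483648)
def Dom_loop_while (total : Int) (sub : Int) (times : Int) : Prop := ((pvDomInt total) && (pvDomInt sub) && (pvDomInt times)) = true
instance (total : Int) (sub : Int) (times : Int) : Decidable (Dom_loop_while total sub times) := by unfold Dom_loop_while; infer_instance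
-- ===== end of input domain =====

-- B replaces the O(times) loop by the closed-form arithmetic-series formula (asymptotically faster).
-- ===== PORT A =====
def loop_while_go (sub : Int) : Nat → Int → Int → Int
  | 0, _, total_sum => total_sum
  | n+1, total, total_sum => loop_while_go sub n (total - sub) (total_sum + (total - sub))

def loop_while (total : Int) (sub : Int) (times : Int) : Int :=
  loop_while_go sub times.toNat total 0

-- ===== PORT B =====
def loop_while_alt (total : Int) (sub : Int) (times : Int) : Int :=
  if times ≤ 0 then 0
  else times * total - PySem.Int.floordiv (sub * times * (times + 1)) 2

-- ===== PRECONDITION & SPEC =====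
def Spec_loop_while (total : Int) (sub : Int) (times : Int) (out : Int) : Prop := out = loop_while_alt total sub times
instance (total : Int) (sub : Int) (times : Int) (out : Int) : Decidable (Spec_loop_while total sub times out) := by unfold Spec_loop_while; infer_instance

-- ===== CLAIM (what is proved, stated in full; the proofs are below) =====
def Claim_equal_loop_while : Prop := ∀ (total : Int) (sub : Int) (times : Int), Dom_loop_while total sub times → Spec_loop_while total sub times (loop_while total sub times)

-- ===== LEMMAS AND PROOFS =====
theorem loop_while_go_eq (sub : Int) : ∀ (n : Nat) (t s : Int),
    2 * loop_while_go sub n t s = 2 * s + 2 * (n : Int) * t - sub * (n : Int) * ((n : Int) + 1) := by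
  intro n
  induction n with
  | zero => intro t s; simp [loop_while_go]
  | succ k ih =>
    intro t s
    have := ih (t - sub) (s + (t - sub))
    simp only [loop_while_go]
    push_cast
    push_cast at this
    linarith [this]

theorem fdiv_even (k : Int) : PySem.Int.floordiv (2 * k) 2 = k := by
  have h := PySem.Int.floordiv_eq_ediv_of_pos (a := 2 * k) (b := 2) (by norm_num)
  rw [h]; omega

-- ===== VERDICT (by name: the statement is the Claim_ definition above) =====
theorem loop_while_spec : Claim_equal_loop_while := by
  intro total sub times _
  unfold Spec_loop_while loop_while loop_while_alt
  by_cases h : times ≤ 0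
  · have : times.toNat = 0 := Int.toNat_of_nonpos h
    simp [this, loop_while_go, h]
  · have hpos : 0 < times := by omega
    have hn : (times.toNat : Int) = times := Int.toNat_of_nonneg (le_of_lt hpos)
    have hgo := loop_while_go_eq sub times.toNat total 0
    rw [hn] at hgo
    have heven : sub * times * (times + 1) = 2 * (times * total - loop_while_go sub times.toNat total 0 ) := by linear_combination hgo
    rw [if_neg h, heven, fdiv_even]
    ring
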